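-- pv_equiv track=rewrite | github.com/diascar/tableToPhylip | tableToPhylip.py | get_areas_list
-- ===== SOURCE A (Python) =====
-- def get_areas_list(areas_dictionary):
--     '''
--     This function creates a list of unique entries (names of the areas)
--     '''
--     area_list = []
--
--     for key in areas_dictionary.keys():
--         for val in areas_dictionary[key]:
--             val_mod = val.rstrip(",").lstrip(",").lower().rstrip().lstrip()
--             if val_mod not in area_list:
--                 area_list.append(val_mod)
--     return sorted(area_list)
-- ===== SOURCE B (Python) =====
-- def get_areas_list(areas_dictionary):
--     '''
--     Sort-then-collapse: normalize every value, sort the whole multiset once,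
--     then drop adjacent duplicates in one linear pass.
--     '''
--     vals = []
--     for value_list in areas_dictionary.values():
--         for val in value_list:
--             vals.append(val.rstrip(",").lstrip(",").lower().rstrip().lstrip())
--     vals.sort()
--     result = []
--     for v in vals:
--         if not result or result[-1] != v:
--             result.append(v)
--     return result
-- ===== Notes on version B (the rewrite author's own statement) =====
-- stated objective: faster
-- what changed: Replaces the dedup-by-repeated-linear-membership-scan list with a single flatten-normalize pass, one sort of the whole multiset, and one linear pass that drops adjacent duplicates.
import Mathlib
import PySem

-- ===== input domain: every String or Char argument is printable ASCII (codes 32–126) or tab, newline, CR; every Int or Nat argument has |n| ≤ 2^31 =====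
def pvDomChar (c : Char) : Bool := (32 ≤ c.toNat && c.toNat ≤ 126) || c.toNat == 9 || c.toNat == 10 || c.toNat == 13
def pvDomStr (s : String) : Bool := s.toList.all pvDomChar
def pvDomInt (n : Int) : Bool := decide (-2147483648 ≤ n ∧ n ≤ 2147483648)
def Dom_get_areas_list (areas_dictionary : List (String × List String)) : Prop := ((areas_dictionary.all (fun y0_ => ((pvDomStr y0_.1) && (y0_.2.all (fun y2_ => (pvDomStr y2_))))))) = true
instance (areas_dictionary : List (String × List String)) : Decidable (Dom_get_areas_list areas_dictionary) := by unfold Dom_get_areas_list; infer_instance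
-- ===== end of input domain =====

-- B replaces A's dedup-by-repeated-membership-scan with one sort of all normalized values
-- followed by a linear collapse of adjacent duplicates (same return value).

-- shared normalization chain: val.rstrip(",").lstrip(",").lower().rstrip().lstrip()
-- .rstrip(",") / .lstrip(",") are ported by hand (PySem has no one-sided strip-with-chars):
-- dropping trailing / leading ',' characters is exact for the one-character chars set ",".
def pvNorm (s : String) : String :=
  String.ofList (PySem.Chars.lstrip (PySem.Chars.rstrip (PySem.Chars.lower
    (((s.toList.reverse.dropWhile (· == ',')).reverse).dropWhile (· == ',')))))

-- ===== PORT A =====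
def get_areas_list (areas_dictionary : List (String × List String)) : List String :=
  PySem.List.sorted
    (areas_dictionary.foldl (fun area_list kv =>
      kv.2.foldl (fun area_list val =>
        if pvNorm val ∈ area_list then area_list else area_list ++ [pvNorm val]) area_list) [])
    (fun x => x) false

-- ===== PORT B =====
def get_areas_list_alt (areas_dictionary : List (String × List String)) : List String :=
  (PySem.List.sorted
      (areas_dictionary.foldl (fun vals kv =>
        kv.2.foldl (fun vals val => vals ++ [pvNorm val]) vals) [])
      (fun x => x) false).foldl
    (fun result v =>
      if result = [] ∨ result.getLast? ≠ some v then result ++ [v] else result) []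

-- ===== PRECONDITION & SPEC =====
def Spec_get_areas_list (areas_dictionary : List (String × List String)) (out : List String) : Prop := out = get_areas_list_alt areas_dictionary
instance (areas_dictionary : List (String × List String)) (out : List String) : Decidable (Spec_get_areas_list areas_dictionary out) := by unfold Spec_get_areas_list; infer_instance

-- ===== CLAIM (what is proved, stated in full; the proofs are below) =====
def Claim_equal_get_areas_list : Prop := ∀ (areas_dictionary : List (String × List String)), Dom_get_areas_list areas_dictionary → Spec_get_areas_list areas_dictionary (get_areas_list areas_dictionary)

-- ===== LEMMAS AND PROOFS =====

-- B's collapse loop as a recursion on the sorted list, parameterized by the last kept element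
def pvCollapse (prev : Option String) : List String → List String
  | [] => []
  | a :: t => if some a = prev then pvCollapse prev t else a :: pvCollapse (some a) t

theorem pv_step_cond (acc : List String) (v : String) :
    (acc = [] ∨ acc.getLast? ≠ some v) ↔ acc.getLast? ≠ some v := by
  cases acc with
  | nil => simp
  | cons x xs => simp

theorem pv_foldl_collapse : ∀ (t acc : List String),
    t.foldl (fun result v =>
      if result = [] ∨ result.getLast? ≠ some v then result ++ [v] else result) acc
    = acc ++ pvCollapse acc.getLast? t := by
  intro t
  induction t with
  | nil => intro acc; simp [pvCollapse]
  | cons a t ih =>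
    intro acc
    rw [List.foldl_cons]
    by_cases hc : acc.getLast? = some a
    · have hnc : ¬ (acc = [] ∨ acc.getLast? ≠ some a) :=
        fun h => ((pv_step_cond acc a).mp h) hc
      rw [if_neg hnc, ih acc]
      have e : pvCollapse acc.getLast? (a :: t) = pvCollapse acc.getLast? t := by
        simp only [pvCollapse, if_pos hc.symm]
      rw [e]
    · have hcnd : acc = [] ∨ acc.getLast? ≠ some a := (pv_step_cond acc a).mpr hc
      rw [if_pos hcnd, ih (acc ++ [a]), List.getLast?_concat]
      have e : pvCollapse acc.getLast? (a :: t) = a :: pvCollapse (some a) t := by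
        have hne : ¬ (some a = acc.getLast?) := fun e2 => hc e2.symm
        simp only [pvCollapse, if_neg hne]
      rw [e]
      simp

theorem pv_mem : ∀ (t : List String) (p x : String),
    x ∈ p :: pvCollapse (some p) t ↔ x ∈ p :: t := by
  intro t
  induction t with
  | nil => intro p x; simp [pvCollapse]
  | cons a t ih =>
    intro p x
    by_cases h : a = p
    · subst h
      have e : pvCollapse (some a) (a :: t) = pvCollapse (some a) t := by
        simp [pvCollapse]
      rw [e, ih a x]
      simp only [List.mem_cons]
      tauto
    · have e : pvCollapse (some p) (a :: t) = a :: pvCollapse (some a) t := by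
        have hne : ¬ (some a = some p) := by simpa using h
        simp only [pvCollapse, if_neg hne]
      rw [e]
      have h2 := ih a x
      simp only [List.mem_cons] at h2 ⊢
      tauto

theorem pv_pairwise_lt : ∀ (t : List String) (p : String),
    (p :: t).Pairwise (fun x y => x ≤ y) →
    (p :: pvCollapse (some p) t).Pairwise (fun x y => x < y) := by
  intro t
  induction t with
  | nil => intro p _; simp [pvCollapse]
  | cons a t ih =>
    intro p h
    obtain ⟨hp, hat⟩ := List.pairwise_cons.mp h
    by_cases hap : a = p
    · subst hap
      have e : pvCollapse (some a) (a :: t) = pvCollapse (some a) t := by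
        simp [pvCollapse]
      rw [e]
      exact ih a hat
    · have e : pvCollapse (some p) (a :: t) = a :: pvCollapse (some a) t := by
        have hne : ¬ (some a = some p) := by simpa using hap
        simp only [pvCollapse, if_neg hne]
      rw [e]
      have htail := ih a hat
      refine List.pairwise_cons.mpr ⟨?_, htail⟩
      intro x hx
      have hpa : p < a := lt_of_le_of_ne (hp a (by simp)) (fun e2 => hap e2.symm)
      have hx' : x ∈ a :: t := (pv_mem t a x).mp hx
      rcases List.mem_cons.mp hx' with rfl | hmem
      · exact hpa
      · exact lt_of_lt_of_le hpa ((List.pairwise_cons.mp hat).1 x hmem)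

-- A's inner loop is a set-update with the normalized values
theorem pv_inner_A (vs : List String) (s : List String) :
    vs.foldl (fun area_list val =>
      if pvNorm val ∈ area_list then area_list else area_list ++ [pvNorm val]) s
    = PySem.Set.update s (vs.map pvNorm) := by
  rw [PySem.Set.update_map_eq_foldl_add]
  exact PySem.List.foldl_congr_mem vs _ _ s
    (fun acc x _ => by simp [PySem.Set.add_eq_ite])

theorem pv_outer_A (d : List (String × List String)) (s : List String) :
    d.foldl (fun area_list kv =>
      kv.2.foldl (fun area_list val =>
        if pvNorm val ∈ area_list then area_list else area_list ++ [pvNorm val]) area_list) s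
    = PySem.Set.update s (d.flatMap (fun kv => kv.2.map pvNorm)) := by
  induction d generalizing s with
  | nil => rfl
  | cons kv d ih =>
    rw [List.foldl_cons, ih, pv_inner_A, List.flatMap_cons, PySem.Set.update_append]

-- B's flatten loop
theorem pv_vals_B (d : List (String × List String)) :
    d.foldl (fun vals kv => kv.2.foldl (fun vals val => vals ++ [pvNorm val]) vals) []
    = d.flatMap (fun kv => kv.2.map pvNorm) := by
  have h1 : d.foldl (fun vals kv => kv.2.foldl (fun vals val => vals ++ [pvNorm val]) vals) []
      = d.foldl (fun vals kv => vals ++ kv.2.map pvNorm) [] :=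
    PySem.List.foldl_congr_mem d _ _ []
      (fun acc kv _ => PySem.List.foldl_append_singleton_eq_map pvNorm kv.2 acc)
  rw [h1, PySem.List.foldl_append_eq_flatMap (fun kv => kv.2.map pvNorm) d [], List.nil_append]

-- the central fact: sorting the dedup list = collapsing the sorted full list
theorem pv_sorted_set_eq_collapse (L : List String) :
    PySem.List.sorted (PySem.Set.ofList L) (fun x => x) false
    = (PySem.List.sorted L (fun x => x) false).foldl (fun result v =>
        if result = [] ∨ result.getLast? ≠ some v then result ++ [v] else result) [] := by
  rw [pv_foldl_collapse]
  simp only [List.nil_append, List.getLast?_nil]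
  cases hS : PySem.List.sorted L (fun x => x) false with
  | nil =>
    have hL : L = [] := (PySem.List.sorted_eq_nil_iff L _ false).mp hS
    subst hL
    rfl
  | cons a t =>
    have hC : pvCollapse none (a :: t) = a :: pvCollapse (some a) t := by
      simp [pvCollapse]
    rw [hC]
    have hpw : (a :: t).Pairwise (fun x y => x ≤ y) := by
      have h := PySem.List.sorted_pairwise L (fun x => x)
      rw [hS] at h; exact h
    have hmemS : ∀ x, x ∈ a :: t ↔ x ∈ L := by
      intro x
      have h := PySem.List.mem_sorted L (fun x => x) false x
      rw [hS] at h; exact h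
    have hlt : (a :: pvCollapse (some a) t).Pairwise (fun x y => x < y) :=
      pv_pairwise_lt t a hpw
    have hperm : (a :: pvCollapse (some a) t).Perm (PySem.Set.ofList L) := by
      rw [List.perm_ext_iff_of_nodup (hlt.imp ne_of_lt) (PySem.Set.nodup_ofList L)]
      intro x
      rw [pv_mem t a x, hmemS x, PySem.Set.mem_ofList L x]
    exact PySem.List.sorted_eq_of_perm_of_pairwise_lt _ _ _ hperm hlt

-- ===== VERDICT (by name: the statement is the Claim_ definition above) =====
theorem get_areas_list_spec : Claim_equal_get_areas_list := by
  intro d _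
  unfold Spec_get_areas_list get_areas_list get_areas_list_alt
  rw [pv_outer_A d [], PySem.Set.update_nil_left, pv_vals_B]
  exact pv_sorted_set_eq_collapse _
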